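-- pv_equiv track=rewrite | github.com/FelipeM89/ParcialLDP | punto1/punto.py | afd_a_b_c
-- ===== SOURCE A (Python) =====
-- def afd_a_b_c(cadena: str) -> bool:
--     estado = 0
--     for c in cadena:
--         if estado == 0:
--             if c == 'a':
--                 estado = 0
--             elif c == 'b':
--                 estado = 1
--             elif c == 'c':
--                 estado = 2
--             else:
--                 return False
--         elif estado == 1:
--             if c == 'b':
--                 estado = 1
--             elif c == 'c':
--                 estado = 2
--             else:
--                 return False
--         elif estado == 2:
--             if c == 'c':
--                 estado = 2
--             else:
--                 return False
--     return True
-- ===== SOURCE B (Python) =====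
-- def afd_a_b_c(cadena: str) -> bool:
--     n = len(cadena)
--     i = 0
--     while i < n and cadena[i] == 'a':
--         i += 1
--     while i < n and cadena[i] == 'b':
--         i += 1
--     while i < n and cadena[i] == 'c':
--         i += 1
--     return i == n
-- ===== Notes on version B (the rewrite author's own statement) =====
-- stated objective: simpler
-- what changed: Replaces the explicit DFA state variable and branch table with three sequential consume-prefix loops (scan a's, then b's, then c's) and a final end-of-string check.
import Mathlib
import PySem

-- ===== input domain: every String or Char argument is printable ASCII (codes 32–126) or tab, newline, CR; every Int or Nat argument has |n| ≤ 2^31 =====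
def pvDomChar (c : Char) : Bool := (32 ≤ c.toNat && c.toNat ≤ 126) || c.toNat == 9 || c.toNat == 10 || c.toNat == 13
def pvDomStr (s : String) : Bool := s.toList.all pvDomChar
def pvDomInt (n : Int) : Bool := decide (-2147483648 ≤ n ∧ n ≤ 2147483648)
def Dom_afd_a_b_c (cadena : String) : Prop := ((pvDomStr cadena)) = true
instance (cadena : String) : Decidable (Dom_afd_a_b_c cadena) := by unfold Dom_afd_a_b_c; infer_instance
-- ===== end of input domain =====

-- B replaces A's single stateful DFA loop with three sequential consume-prefix scans (objective: simpler).

-- ===== PORT A =====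
-- A's for-loop with early return and the mutable 'estado', as structural recursion over the characters.
def afdLoopA (estado : Int) : List Char → Bool
  | [] => true
  | c :: cs =>
    if estado == 0 then
      if c == 'a' then afdLoopA 0 cs
      else if c == 'b' then afdLoopA 1 cs
      else if c == 'c' then afdLoopA 2 cs
      else false
    else if estado == 1 then
      if c == 'b' then afdLoopA 1 cs
      else if c == 'c' then afdLoopA 2 cs
      else false
    else if estado == 2 then
      if c == 'c' then afdLoopA 2 cs
      else false
    else afdLoopA estado cs

def afd_a_b_c (cadena : String) : Bool := afdLoopA 0 cadena.toList

-- ===== PORT B =====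
-- One phase of B: advance past every leading occurrence of ch (a 'while' loop in Source B).
def consume (ch : Char) : List Char → List Char
  | [] => []
  | c :: cs => if c == ch then consume ch cs else c :: cs

def afd_a_b_c_alt (cadena : String) : Bool :=
  (consume 'c' (consume 'b' (consume 'a' cadena.toList))).isEmpty

-- ===== PRECONDITION & SPEC =====
def Spec_afd_a_b_c (cadena : String) (out : Bool) : Prop := out = afd_a_b_c_alt cadena
instance (cadena : String) (out : Bool) : Decidable (Spec_afd_a_b_c cadena out) := by unfold Spec_afd_a_b_c; infer_instance

-- ===== CLAIM (what is proved, stated in full; the proofs are below) =====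
def Claim_equal_afd_a_b_c : Prop := ∀ (cadena : String), Dom_afd_a_b_c cadena → Spec_afd_a_b_c cadena (afd_a_b_c cadena)

-- ===== LEMMAS AND PROOFS =====
theorem afdLoopA_two (cs : List Char) : afdLoopA 2 cs = (consume 'c' cs).isEmpty := by
  induction cs with
  | nil => rfl
  | cons c cs ih =>
    simp only [afdLoopA, consume]
    by_cases h : c = 'c' <;> simp [h, ih, List.isEmpty]

theorem afdLoopA_one (cs : List Char) : afdLoopA 1 cs = (consume 'c' (consume 'b' cs)).isEmpty := by
  induction cs with
  | nil => rfl
  | cons c cs ih =>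
    simp only [afdLoopA, consume]
    by_cases hb : c = 'b'
    · simp [hb, ih]
    · by_cases hc : c = 'c' <;> simp [hb, hc, afdLoopA_two, consume, List.isEmpty]

theorem afdLoopA_zero (cs : List Char) :
    afdLoopA 0 cs = (consume 'c' (consume 'b' (consume 'a' cs))).isEmpty := by
  induction cs with
  | nil => rfl
  | cons c cs ih =>
    simp only [afdLoopA, consume]
    by_cases ha : c = 'a'
    · simp [ha, ih]
    · by_cases hb : c = 'b'
      · simp [hb, afdLoopA_one, consume]
      · by_cases hc : c = 'c' <;>
          simp [ha, hb, hc, afdLoopA_two, consume, List.isEmpty]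

-- ===== VERDICT (by name: the statement is the Claim_ definition above) =====
theorem afd_a_b_c_spec : Claim_equal_afd_a_b_c := by
  intro cadena _
  unfold Spec_afd_a_b_c afd_a_b_c afd_a_b_c_alt
  exact afdLoopA_zero cadena.toList
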